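-- pv_equiv track=rewrite | github.com/t81dev/ternary-fabric | tools/hydration_benchmark.py | hydrate_binary
-- ===== SOURCE A (Python) =====
-- def hydrate_binary(packed_bytes):
--     # Conventional binary: 2 bits per trit, 4 trits per byte
--     trits = []
--     for b in packed_bytes:
--         val = b
--         for _ in range(4):
--             t_bits = val & 0x3
--             val >>= 2
--             # 00=0, 01=+1, 10=-1
--             trits.append(1 if t_bits == 1 else -1 if t_bits == 2 else 0)
--     return trits
-- ===== SOURCE B (Python) =====
-- _TABLE = [
--     [(1 if ((b >> (2 * i)) & 0x3) == 1 else -1 if ((b >> (2 * i)) & 0x3) == 2 else 0)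
--      for i in range(4)]
--     for b in range(256)
-- ]
--
--
-- def hydrate_binary(packed_bytes):
--     # Table-driven: one lookup per byte instead of a 4-step shift loop.
--     # Trits depend only on the low 8 bits, so index with b & 0xFF.
--     trits = []
--     for b in packed_bytes:
--         trits.extend(_TABLE[b & 0xFF])
--     return trits
-- ===== Notes on version B (the rewrite author's own statement) =====
-- stated objective: faster
-- what changed: Replaces the per-byte 4-iteration shift/mask loop with a precomputed 256-row lookup table indexed by b & 0xFF, appending each precomputed 4-trit row in one step.
import Mathlib
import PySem

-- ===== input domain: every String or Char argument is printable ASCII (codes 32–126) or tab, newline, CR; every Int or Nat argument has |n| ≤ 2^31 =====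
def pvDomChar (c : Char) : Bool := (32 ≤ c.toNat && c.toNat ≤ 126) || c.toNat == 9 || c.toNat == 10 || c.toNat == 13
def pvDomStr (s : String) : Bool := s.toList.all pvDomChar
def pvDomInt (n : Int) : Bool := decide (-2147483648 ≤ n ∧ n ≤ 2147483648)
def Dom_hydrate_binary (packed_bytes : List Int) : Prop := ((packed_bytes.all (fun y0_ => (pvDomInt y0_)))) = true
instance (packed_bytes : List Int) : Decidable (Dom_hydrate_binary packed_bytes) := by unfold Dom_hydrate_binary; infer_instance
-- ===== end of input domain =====

-- B replaces A's per-byte 4-step shift loop by a precomputed 256-entry table lookup (objective: faster, constant factor).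

-- ===== PORT A =====
-- inner 'for _ in range(4)' loop of A, carried state (trits, val)
def hydrateByteA (trits : List Int) (b : Int) : List Int × Int :=
  (PySem.List.pyRange 0 4 1).foldl
    (fun (st : List Int × Int) _ =>
      let t_bits := PySem.Int.band st.2 0x3      -- val & 0x3
      let val := st.2 >>> (2:Nat)                -- val >>= 2 (Python '>>' = Lean '>>>' on Int, per PYSEM)
      (st.1 ++ [if t_bits == 1 then (1 : Int) else if t_bits == 2 then -1 else 0], val))
    (trits, b)

def hydrate_binary (packed_bytes : List Int) : List Int :=
  packed_bytes.foldl (fun trits b => (hydrateByteA trits b).1) []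

-- ===== PORT B =====
-- _TABLE = [[decode of 2-bit field i of b for i in range(4)] for b in range(256)]
def pvTABLE : List (List Int) :=
  (PySem.List.pyRange 0 256 1).map (fun b =>
    (PySem.List.pyRange 0 4 1).map (fun i =>
      let t := PySem.Int.band (b >>> (2 * i).toNat) 0x3   -- (b >> (2*i)) & 0x3; i ≥ 0 so .toNat is exact
      if t == 1 then (1 : Int) else if t == 2 then -1 else 0))

def hydrate_binary_alt (packed_bytes : List Int) : List Int :=
  packed_bytes.foldl
    (fun trits b => trits ++ (PySem.List.pyGetD pvTABLE (PySem.Int.band b 0xFF) []))   -- trits.extend(_TABLE[b & 0xFF]); index is always in range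
    []

-- ===== PRECONDITION & SPEC =====
def Spec_hydrate_binary (packed_bytes : List Int) (out : List Int) : Prop := out = hydrate_binary_alt packed_bytes
instance (packed_bytes : List Int) (out : List Int) : Decidable (Spec_hydrate_binary packed_bytes out) := by unfold Spec_hydrate_binary; infer_instance

-- ===== CLAIM (what is proved, stated in full; the proofs are below) =====
def Claim_equal_hydrate_binary : Prop := ∀ (packed_bytes : List Int), Dom_hydrate_binary packed_bytes → Spec_hydrate_binary packed_bytes (hydrate_binary packed_bytes)

-- ===== LEMMAS AND PROOFS =====

-- masking with 3 / 255 is the remainder mod 4 / 256, also on negative ints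
theorem pv_band_3 (a : Int) : PySem.Int.band a 3 = a % 4 := by
  rcases le_or_gt 0 a with h | h
  · simp only [PySem.Int.band, if_pos h, if_pos (by norm_num : (0:Int) ≤ 3)]
    rw [(by exact Nat.and_two_pow_sub_one_eq_mod a.toNat 2 : a.toNat &&& (3:Int).toNat = a.toNat % 4)]
    omega
  · simp only [PySem.Int.band, if_neg (by omega : ¬ (0:Int) ≤ a), if_pos (by norm_num : (0:Int) ≤ 3)]
    rw [(by rw [Nat.land_comm]; exact Nat.and_two_pow_sub_one_eq_mod _ 2 :
        (3:Int).toNat &&& (-a-1).toNat = (-a-1).toNat % 4)]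
    have h2 : (-a-1).toNat % 4 < 4 := Nat.mod_lt _ (by norm_num)
    omega

theorem pv_band_255 (a : Int) : PySem.Int.band a 255 = a % 256 := by
  rcases le_or_gt 0 a with h | h
  · simp only [PySem.Int.band, if_pos h, if_pos (by norm_num : (0:Int) ≤ 255)]
    rw [(by exact Nat.and_two_pow_sub_one_eq_mod a.toNat 8 : a.toNat &&& (255:Int).toNat = a.toNat % 256)]
    omega
  · simp only [PySem.Int.band, if_neg (by omega : ¬ (0:Int) ≤ a), if_pos (by norm_num : (0:Int) ≤ 255)]
    rw [(by rw [Nat.land_comm]; exact Nat.and_two_pow_sub_one_eq_mod _ 8 :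
        (255:Int).toNat &&& (-a-1).toNat = (-a-1).toNat % 256)]
    have h2 : (-a-1).toNat % 256 < 256 := Nat.mod_lt _ (by norm_num)
    omega

theorem pv_shr (a : Int) (k : Nat) : a >>> k = a / 2 ^ k := by
  have := Int.shiftRight_eq_div_pow a k
  exact_mod_cast this

theorem pv_rowA (trits : List Int) (b : Int) :
    (hydrateByteA trits b).1 = trits ++ (PySem.List.pyGetD pvTABLE (PySem.Int.band b 0xFF) []) := by
  rw [(by exact pv_band_255 b : PySem.Int.band b 0xFF = b % 256)]
  have h0 : (0:Int) ≤ b % 256 := Int.emod_nonneg b (by norm_num)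
  have h1 : b % 256 < 256 := Int.emod_lt_of_pos b (by norm_num)
  unfold pvTABLE
  rw [PySem.List.pyGetD_map_pyRange_of_nonneg _ _ _ _ h0 h1]
  have hr4 : PySem.List.pyRange 0 4 1 = [0,1,2,3] := by decide
  unfold hydrateByteA
  rw [hr4]
  simp only [List.foldl, List.map, List.append_assoc, List.cons_append, List.nil_append]
  congr 1
  norm_num [pv_shr, pv_band_3]
  have e1 : b / 4 % 4 = b % 256 / 4 % 4 := by omega
  have e2 : b / 4 / 4 % 4 = b % 256 / 16 % 4 := by omega
  have e3 : b / 4 / 4 / 4 % 4 = b % 256 / 64 % 4 := by omega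
  rw [e1, e2, e3]
  constructor <;> [skip; constructor] <;> rfl

-- the two folds agree step by step: A's inner loop emits exactly B's table row
theorem pv_main (xs acc : List Int) :
    xs.foldl (fun trits b => (hydrateByteA trits b).1) acc =
    xs.foldl (fun trits b => trits ++ (PySem.List.pyGetD pvTABLE (PySem.Int.band b 0xFF) [])) acc := by
  simp only [pv_rowA]

-- ===== VERDICT (by name: the statement is the Claim_ definition above) =====
theorem hydrate_binary_spec : Claim_equal_hydrate_binary := by
  intro packed_bytes _
  unfold Spec_hydrate_binary hydrate_binary hydrate_binary_alt
  exact pv_main packed_bytes []
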